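-- pv_equiv track=rewrite | github.com/ahmadbasyouni10/Codepath-Technical-Interview-102-Session-Problems | main3.py | sort_performances_by_type
-- ===== SOURCE A (Python) =====
-- def sort_performances_by_type(arr):
--     stack1 = []  # Stack for even numbers
--     stack2 = []  # Stack for odd numbers
--     # Loop through each number in the input array
--     for num in arr:
--         if num % 2 == 0:
--             stack1.append(num)  # Add to stack1 if even
--         else:
--             stack2.append(num)  # Add to stack2 if odd
--     # Concatenate the two stacks and return
--     return stack1 + stack2
-- ===== SOURCE B (Python) =====
-- def sort_performances_by_type(arr):
--     # Stable sort by parity key: evens (key 0) keep order and precede odds (key 1).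
--     return sorted(arr, key=lambda x: x % 2)
-- ===== Notes on version B (the rewrite author's own statement) =====
-- stated objective: idiomatic
-- what changed: Replaces the two-bucket append loop with a single stable sort keyed on x % 2; stability makes evens precede odds with original order preserved.
import Mathlib
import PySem

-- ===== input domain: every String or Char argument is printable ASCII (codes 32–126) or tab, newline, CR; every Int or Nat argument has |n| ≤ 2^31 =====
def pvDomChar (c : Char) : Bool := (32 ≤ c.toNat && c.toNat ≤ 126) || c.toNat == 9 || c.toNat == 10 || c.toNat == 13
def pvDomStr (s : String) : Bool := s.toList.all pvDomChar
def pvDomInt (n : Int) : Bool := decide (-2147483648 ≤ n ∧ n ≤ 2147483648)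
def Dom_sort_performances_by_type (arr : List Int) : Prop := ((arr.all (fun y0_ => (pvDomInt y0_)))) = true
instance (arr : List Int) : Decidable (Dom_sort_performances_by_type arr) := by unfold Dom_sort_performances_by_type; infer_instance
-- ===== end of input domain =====

-- B replaces A's two-bucket append loop with one stable sort keyed on parity (idiomatic; not faster).

-- ===== PORT A =====
-- loop over arr maintaining the pair (stack1, stack2), then concatenate
def sort_performances_by_type (arr : List Int) : List Int :=
  match arr.foldl
      (fun (s : List Int × List Int) num =>
        if PySem.Int.mod num 2 = 0 then (s.1 ++ [num], s.2) else (s.1, s.2 ++ [num]))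
      ([], []) with
  | (stack1, stack2) => stack1 ++ stack2

-- ===== PORT B =====
-- sorted(arr, key=lambda x: x % 2)
def sort_performances_by_type_alt (arr : List Int) : List Int :=
  PySem.List.sorted arr (fun x => PySem.Int.mod x 2) false

-- ===== PRECONDITION & SPEC =====
def Spec_sort_performances_by_type (arr : List Int) (out : List Int) : Prop := out = sort_performances_by_type_alt arr
instance (arr : List Int) (out : List Int) : Decidable (Spec_sort_performances_by_type arr out) := by unfold Spec_sort_performances_by_type; infer_instance

-- ===== CLAIM (what is proved, stated in full; the proofs are below) =====
def Claim_equal_sort_performances_by_type : Prop := ∀ (arr : List Int), Dom_sort_performances_by_type arr → Spec_sort_performances_by_type arr (sort_performances_by_type arr)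

-- ===== LEMMAS AND PROOFS =====

-- parity key is 0 or 1
theorem pv_mod2_cases (x : Int) : PySem.Int.mod x 2 = 0 ∨ PySem.Int.mod x 2 = 1 := by
  have h1 := PySem.Int.mod_nonneg x (b := 2) (by omega)
  have h2 := PySem.Int.mod_lt x (b := 2) (by omega)
  omega

-- stable insertion into evens ++ odds: x goes between the blocks when x is before every odd
theorem pv_insertBy_mid (before : Int → Int → Bool) (x : Int) (E O : List Int)
    (hE : ∀ y ∈ E, before x y = false) (hO : ∀ y ∈ O, before x y = true) :
    PySem.List.insertBy before x (E ++ O) = E ++ x :: O := by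
  induction E with
  | nil =>
      cases O with
      | nil => rfl
      | cons o os => simp [PySem.List.insertBy, hO o (by simp)]
  | cons e es ih =>
      have h := hE e (by simp)
      simp only [List.cons_append, PySem.List.insertBy, h, Bool.false_eq_true, if_false]
      rw [ih (fun y hy => hE y (by simp [hy]))]

-- loop invariant for B's fold-of-insertions form
theorem pv_sorted_loop (xs : List Int) : ∀ (E O : List Int),
    (∀ y ∈ E, PySem.Int.mod y 2 = 0) → (∀ y ∈ O, PySem.Int.mod y 2 = 1) →
    xs.foldl (fun acc x => PySem.List.insertBy
        (fun a b => decide (PySem.Int.mod a 2 < PySem.Int.mod b 2)) x acc) (E ++ O)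
      = (E ++ xs.filter (fun x => decide (PySem.Int.mod x 2 = 0)))
        ++ (O ++ xs.filter (fun x => !decide (PySem.Int.mod x 2 = 0))) := by
  induction xs with
  | nil => intro E O _ _; simp
  | cons x t ih =>
      intro E O hE hO
      rcases pv_mod2_cases x with hx | hx
      · have hins : PySem.List.insertBy
            (fun a b => decide (PySem.Int.mod a 2 < PySem.Int.mod b 2)) x (E ++ O)
            = (E ++ [x]) ++ O := by
          rw [pv_insertBy_mid _ x E O
            (fun y hy => by rw [hx, hE y hy]; decide)
            (fun y hy => by rw [hx, hO y hy]; decide)]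
          simp
        simp only [List.foldl_cons, hins,
          ih (E ++ [x]) O
            (fun y hy => by rcases List.mem_append.mp hy with h | h;
                            exact hE y h; simp at h; simpa [h] using hx) hO]
        simp only [List.filter_cons, hx]
        norm_num
      · have hins : PySem.List.insertBy
            (fun a b => decide (PySem.Int.mod a 2 < PySem.Int.mod b 2)) x (E ++ O)
            = (E ++ O) ++ [x] := by
          apply PySem.List.insertBy_of_forall_not_before
          intro y hy
          rcases pv_mod2_cases y with h | h <;> (rw [hx, h]; decide)
        have hOx : ∀ y ∈ O ++ [x], PySem.Int.mod y 2 = 1 := by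
          intro y hy; rcases List.mem_append.mp hy with h | h
          · exact hO y h
          · simp at h; simpa [h] using hx
        simp only [List.foldl_cons, hins, List.append_assoc, ih E (O ++ [x]) hE hOx]
        simp only [List.filter_cons, hx]
        norm_num

-- A's fold over the pair of stacks, characterised
theorem pv_A_eq (arr : List Int) :
    sort_performances_by_type arr
      = arr.filter (fun x => decide (PySem.Int.mod x 2 = 0))
        ++ arr.filter (fun x => !decide (PySem.Int.mod x 2 = 0)) := by
  unfold sort_performances_by_type
  have hbody : (fun (s : List Int × List Int) num =>
      if PySem.Int.mod num 2 = 0 then (s.1 ++ [num], s.2) else (s.1, s.2 ++ [num]))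
      = (fun s num => (if PySem.Int.mod num 2 = 0 then s.1 ++ [num] else s.1,
                       if PySem.Int.mod num 2 = 0 then s.2 else s.2 ++ [num])) := by
    funext s num
    by_cases h : PySem.Int.mod num 2 = 0
    · simp only [if_pos h]
    · simp only [if_neg h]
  rw [hbody, PySem.List.foldl_prod_mk
    (f := fun acc num => if PySem.Int.mod num 2 = 0 then acc ++ [num] else acc)
    (g := fun acc num => if PySem.Int.mod num 2 = 0 then acc else acc ++ [num])]
  simp only []
  congr 1
  · simpa using PySem.List.foldl_append_ite_eq_filter
      (p := fun x => PySem.Int.mod x 2 = 0) (l := arr) (acc := [])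
  · have := PySem.List.foldl_append_if_eq_filter
      (p := fun x => !decide (PySem.Int.mod x 2 = 0)) (l := arr) (acc := ([] : List Int))
    simp only [List.nil_append] at this ⊢
    rw [← this]
    apply PySem.List.foldl_congr_mem
    intro acc x _
    by_cases h : PySem.Int.mod x 2 = 0
    · simp only [h, decide_true, Bool.not_true, Bool.false_eq_true, if_false, if_pos trivial]
    · rw [if_neg h, decide_eq_false h]
      simp only [Bool.not_false, if_true]

-- ===== VERDICT (by name: the statement is the Claim_ definition above) =====
theorem sort_performances_by_type_spec : Claim_equal_sort_performances_by_type := by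
  intro arr _
  unfold Spec_sort_performances_by_type sort_performances_by_type_alt
  rw [PySem.List.sorted_eq_foldl_insertBy, pv_A_eq]
  simpa using (pv_sorted_loop arr [] [] (by simp) (by simp)).symm
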